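-- pv_equiv track=rewrite | github.com/lynever/prac_programmars | 프로그래머스/lv2/12914. 멀리 뛰기/멀리 뛰기.py | solution
-- ===== SOURCE A (Python) =====
-- from math import comb
--
-- def solution(n):
--     answer = 0
--     if n % 2 == 0:
--         for i in range(0, n // 2 + 1):
--             answer += comb(n - i, i)
--     else:
--         for i in range(0, n // 2 + 1):
--             answer += comb(n - i, i)
--     return answer % 1234567
-- ===== SOURCE B (Python) =====
-- def solution(n):
--     # number of ways = Fibonacci(n+1); compute it iteratively mod 1234567
--     if n < 0:
--         return 0
--     a, b = 0, 1
--     for _ in range(n):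
--         a, b = b, (a + b) % 1234567
--     return b
-- ===== Notes on version B (the rewrite author's own statement) =====
-- stated objective: faster
-- what changed: Replaced the sum of binomial coefficients comb(n-i,i), each recomputed from scratch, by a single iterative Fibonacci recurrence whose state is kept reduced modulo the problem's constant, using the identity that the diagonal binomial sum equals a Fibonacci number.
import Mathlib
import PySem

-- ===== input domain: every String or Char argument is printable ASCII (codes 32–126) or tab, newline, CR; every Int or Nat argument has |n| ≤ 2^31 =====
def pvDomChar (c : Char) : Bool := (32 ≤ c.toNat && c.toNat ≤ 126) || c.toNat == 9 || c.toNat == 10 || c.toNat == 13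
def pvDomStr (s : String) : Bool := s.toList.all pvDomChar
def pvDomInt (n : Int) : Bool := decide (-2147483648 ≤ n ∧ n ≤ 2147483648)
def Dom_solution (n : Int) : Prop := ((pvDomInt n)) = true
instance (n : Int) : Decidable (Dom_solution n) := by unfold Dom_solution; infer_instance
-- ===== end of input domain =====

-- B replaces A's quadratic sum of binomials by the linear Fibonacci recurrence mod 1234567 (faster).

-- ===== PORT A =====
-- math.comb(a, b) for 0 ≤ b ≤ a is Nat.choose; inside A's loop both arguments are nonnegative.
def solution (n : Int) : Int :=
  let answer : Int := 0
  let answer : Int :=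
    if PySem.Int.mod n 2 == 0 then
      (PySem.List.pyRange 0 (PySem.Int.floordiv n 2 + 1) 1).foldl
        (fun acc i => acc + ((n - i).toNat.choose i.toNat : Int)) answer
    else
      (PySem.List.pyRange 0 (PySem.Int.floordiv n 2 + 1) 1).foldl
        (fun acc i => acc + ((n - i).toNat.choose i.toNat : Int)) answer
  PySem.Int.mod answer 1234567

-- ===== PORT B =====
def solution_alt (n : Int) : Int :=
  if n < 0 then 0
  else
    let p := (PySem.List.pyRange 0 n 1).foldl
      (fun (p : Int × Int) _ => (p.2, PySem.Int.mod (p.1 + p.2) 1234567)) (0, 1)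
    p.2

-- ===== PRECONDITION & SPEC =====
def Spec_solution (n : Int) (out : Int) : Prop := out = solution_alt n
instance (n : Int) (out : Int) : Decidable (Spec_solution n out) := by unfold Spec_solution; infer_instance

-- ===== CLAIM (what is proved, stated in full; the proofs are below) =====
def Claim_equal_solution : Prop := ∀ (n : Int), Dom_solution n → Spec_solution n (solution n)

-- ===== LEMMAS AND PROOFS =====

-- The diagonal binomial sum is a Fibonacci number.
theorem sum_choose_diag (m : ℕ) :
    ∑ i ∈ Finset.range (m / 2 + 1), (m - i).choose i = Nat.fib (m + 1) := by
  rw [Nat.fib_succ_eq_sum_choose m,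
      Finset.Nat.sum_antidiagonal_eq_sum_range_succ_mk (fun p : ℕ × ℕ => p.1.choose p.2) m]
  have hrefl : ∑ k ∈ Finset.range (m + 1), k.choose (m - k)
      = ∑ k ∈ Finset.range (m + 1), (m - k).choose k := by
    rw [← Finset.sum_range_reflect (fun k => (m - k).choose k) (m + 1)]
    refine Finset.sum_congr rfl ?_
    intro i hi
    simp only [Finset.mem_range] at hi
    congr 1
    omega
  rw [show m.succ = m + 1 from rfl, hrefl]
  refine Finset.sum_subset ?_ ?_
  · intro i hi
    simp only [Finset.mem_range] at hi ⊢
    omega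
  · intro i hi hni
    simp only [Finset.mem_range] at hi hni
    exact Nat.choose_eq_zero_of_lt (by omega)

-- A's loop computes the diagonal binomial sum (as an Int), for nonnegative n.
theorem loopA (m : ℕ) :
    (PySem.List.pyRange 0 ((m : Int) / 2 + 1) 1).foldl
        (fun acc i => acc + (((m : Int) - i).toNat.choose i.toNat : Int)) 0
      = ((∑ i ∈ Finset.range (m / 2 + 1), (m - i).choose i : ℕ) : Int) := by
  have hdiv : (m : Int) / 2 = ((m / 2 : ℕ) : Int) := by omega
  rw [hdiv]
  have : ((m / 2 : ℕ) : Int) + 1 = ((m / 2 + 1 : ℕ) : Int) := by push_cast; ring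
  rw [this, PySem.List.pyRange_zero_nat]
  induction (m / 2 + 1) with
  | zero => simp
  | succ k ih =>
    rw [List.range_succ, List.map_append, List.foldl_append, ih,
        Finset.sum_range_succ]
    simp only [List.map_cons, List.map_nil, List.foldl_cons, List.foldl_nil]
    have hc : (((m : Int) - (k : Int)).toNat.choose ((k : Int)).toNat : Int)
        = ((m - k).choose k : Int) := by
      by_cases h : k ≤ m
      · have h1 : ((m : Int) - (k : Int)).toNat = m - k := by omega
        rw [h1, Int.toNat_natCast]
      · have h1 : ((m : Int) - (k : Int)).toNat = 0 := by omega
        have h2 : (m - k).choose k = 0 := Nat.choose_eq_zero_of_lt (by omega)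
        rw [h1, Int.toNat_natCast, h2, Nat.choose_eq_zero_of_lt (by omega)]
    rw [hc]
    push_cast
    ring

-- B's loop state after k iterations: the pair of consecutive Fibonacci residues.
theorem loopB (k : ℕ) :
    (List.range k).foldl
        (fun (p : Int × Int) _ => (p.2, PySem.Int.mod (p.1 + p.2) 1234567)) ((0 : Int), (1 : Int))
      = ((Nat.fib k : Int) % 1234567, (Nat.fib (k + 1) : Int) % 1234567) := by
  induction k with
  | zero => simp
  | succ k ih =>
    rw [List.range_succ, List.foldl_append, ih]
    simp only [List.foldl_cons, List.foldl_nil]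
    rw [Prod.mk.injEq]
    refine ⟨rfl, ?_⟩
    rw [PySem.Int.mod_eq_emod_of_pos (by norm_num), ← Int.add_emod, Nat.fib_add_two]
    push_cast
    ring_nf

-- ===== VERDICT (by name: the statement is the Claim_ definition above) =====
theorem solution_spec : Claim_equal_solution := by
  intro n _
  show solution n = solution_alt n
  unfold solution solution_alt
  rcases lt_or_ge n 0 with hn | hn
  · -- n < 0: A's range is empty so the sum is 0, B returns 0 directly
    have hfd : PySem.Int.floordiv n 2 = n / 2 :=
      PySem.Int.floordiv_eq_ediv_of_pos (by norm_num)
    have he : PySem.List.pyRange 0 (n / 2 + 1) 1 = [] :=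
      PySem.List.pyRange_one_eq_nil (by omega)
    simp only [hfd, he, List.foldl_nil, ite_self, if_pos hn]
    rw [PySem.Int.mod_eq_emod_of_pos (by norm_num)]
    norm_num
  · -- n = (m : ℕ)
    obtain ⟨m, rfl⟩ := Int.eq_ofNat_of_zero_le hn
    have hfd : PySem.Int.floordiv (m : Int) 2 = (m : Int) / 2 :=
      PySem.Int.floordiv_eq_ediv_of_pos (by norm_num)
    have hne : ¬ ((m : Int) < 0) := by omega
    simp only [hfd, hne, if_false]
    have hA : (if PySem.Int.mod (m : Int) 2 == 0 then
          (PySem.List.pyRange 0 ((m : Int) / 2 + 1) 1).foldl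
            (fun acc i => acc + (((m : Int) - i).toNat.choose i.toNat : Int)) 0
        else
          (PySem.List.pyRange 0 ((m : Int) / 2 + 1) 1).foldl
            (fun acc i => acc + (((m : Int) - i).toNat.choose i.toNat : Int)) 0)
        = ((Nat.fib (m + 1) : ℕ) : Int) := by
      split_ifs <;> rw [loopA, sum_choose_diag]
    rw [hA, PySem.List.pyRange_zero_nat, List.foldl_map, loopB]
    show PySem.Int.mod ((Nat.fib (m + 1) : ℕ) : Int) 1234567 = (Nat.fib (m + 1) : Int) % 1234567
    rw [PySem.Int.mod_eq_emod_of_pos (by norm_num)]
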